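-- pv_equiv track=rewrite | github.com/jobedom/aoc-2020 | day20/problem.py | tile_rotations
-- ===== SOURCE A (Python) =====
-- def tile_rotations(tile):
--     size = len(tile)
--     result = [tile]
--     for count in range(0, 3):
--         previous = tile
--         tile = [row[:] for row in tile]
--         for row in range(0, size):
--             for column in range(0, size):
--                 tile[row][column] = previous[size - column - 1][row]
--         result.append(tile)
--     return result
-- ===== SOURCE B (Python) =====
-- def tile_rotations(tile):
--     n = len(tile)
--     r90 = [[tile[n - 1 - c][r] for c in range(n)] for r in range(n)]
--     r180 = [[tile[n - 1 - r][n - 1 - c] for c in range(n)] for r in range(n)]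
--     r270 = [[tile[c][n - 1 - r] for c in range(n)] for r in range(n)]
--     return [tile, r90, r180, r270]
-- ===== Notes on version B (the rewrite author's own statement) =====
-- stated objective: simpler
-- what changed: Each of the three rotations is computed directly from the ORIGINAL tile by a closed-form index formula (90/180/270 degrees), instead of three iterations that overwrite a mutable row-copy cell by cell from the previous orientation.
-- intended difference: On ragged tiles whose rows are all at least len(tile) long but not all exactly that long, A returns rotations that keep stale trailing cells of the copied rows (its loops only overwrite the first len(tile) columns), while B returns the clean len(tile)-square rotations, the intended value. — e.g. on tile_rotations([["a", "b"]]): A returns [[["a", "b"]], [["a", "b"]], [["a", "b"]], [["a", "b"]]], B returns [[["a", "b"]], [["a"]], [["a"]], [["a"]]]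
import Mathlib
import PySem

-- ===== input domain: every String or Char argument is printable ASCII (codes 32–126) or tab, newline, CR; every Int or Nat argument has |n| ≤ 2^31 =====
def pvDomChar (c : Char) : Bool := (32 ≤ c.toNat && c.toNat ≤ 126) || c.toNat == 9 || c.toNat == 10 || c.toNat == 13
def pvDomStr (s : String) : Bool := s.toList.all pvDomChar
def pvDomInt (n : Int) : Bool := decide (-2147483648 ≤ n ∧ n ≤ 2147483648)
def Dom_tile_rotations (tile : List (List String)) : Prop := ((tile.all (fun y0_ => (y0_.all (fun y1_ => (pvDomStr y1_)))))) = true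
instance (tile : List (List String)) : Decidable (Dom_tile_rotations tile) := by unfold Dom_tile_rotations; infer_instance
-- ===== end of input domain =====

-- B computes the three rotations straight from the original tile by closed-form
-- index formulas instead of A's three in-place cell-by-cell overwrite passes (objective: simpler).

-- ===== PORT A =====
-- the inner `for column` loop; `tile[row][column] = previous[size - column - 1][row]`:
-- all indices lie in [0, size), so on the square tiles admitted by Pre_ the getD
-- defaults are never reached and set/getD are exact for Python's index assignment/read.
def pvInnerLoop (previous : List (List String)) (size row : Nat)
    (t : List (List String)) : List (List String) :=
  (List.range size).foldl (fun t column =>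
    t.set row ((t.getD row []).set column
      ((previous.getD (size - column - 1) []).getD row ""))) t

def pvRotStep (previous : List (List String)) (size : Nat) : List (List String) :=
  -- tile = [row[:] for row in tile]  (a pure row copy), then the `for row` loop
  (List.range size).foldl (fun t row => pvInnerLoop previous size row t)
    (previous.map (fun r => r))

def tile_rotations (tile : List (List String)) : List (List (List String)) :=
  let size := tile.length
  ((List.range 3).foldl
    (fun (s : List (List String) × List (List (List String))) _ =>
      let previous := s.1
      let t := pvRotStep previous size
      (t, s.2 ++ [t]))
    (tile, [tile])).2

-- ===== PORT B =====
-- tile[r][c] (indices in range under Pre_)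
def pvGet (tile : List (List String)) (r c : Nat) : String :=
  (tile.getD r []).getD c ""

def tile_rotations_alt (tile : List (List String)) : List (List (List String)) :=
  let n := tile.length
  let r90 := (List.range n).map (fun r => (List.range n).map (fun c => pvGet tile (n - 1 - c) r))
  let r180 := (List.range n).map (fun r => (List.range n).map (fun c => pvGet tile (n - 1 - r) (n - 1 - c)))
  let r270 := (List.range n).map (fun r => (List.range n).map (fun c => pvGet tile c (n - 1 - r)))
  [tile, r90, r180, r270]

-- ===== PRECONDITION & SPEC =====
-- Pre_ excludes exactly the inputs on which A raises IndexError: a row shorter than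
-- len(tile) makes `previous[size - column - 1][row]` (or the assignment) go out of range.
def Pre_tile_rotations (tile : List (List String)) : Prop :=
  ∀ row ∈ tile, tile.length ≤ row.length
instance (tile : List (List String)) : Decidable (Pre_tile_rotations tile) := by
  unfold Pre_tile_rotations; infer_instance

def pvWitness_tile_rotations : List (List String) := [["a", "b"], ["c", "d"]]

-- On ragged tiles whose rows are all at least len(tile) long but not all exactly that long,
-- A returns rotations that keep stale trailing cells copied from the input rows (its loops
-- only overwrite the first len(tile) columns); B returns the clean len(tile)×len(tile)
-- rotations, the intended value of a rotation.
def D_tile_rotations (tile : List (List String)) : Prop :=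
  ∃ row ∈ tile, row.length ≠ tile.length
instance (tile : List (List String)) : Decidable (D_tile_rotations tile) := by
  unfold D_tile_rotations; infer_instance

def Spec_tile_rotations (tile : List (List String)) (out : List (List (List String))) : Prop := ¬ D_tile_rotations tile → out = tile_rotations_alt tile
instance (tile : List (List String)) (out : List (List (List String))) : Decidable (Spec_tile_rotations tile out) := by unfold Spec_tile_rotations; infer_instance

def pvDiffWitness_tile_rotations : List (List String) := [["a", "b"]]

def pvDiffWitnessOut_tile_rotations : (List (List (List String))) × (List (List (List String))) :=
  ([[["a", "b"]], [["a", "b"]], [["a", "b"]], [["a", "b"]]],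
   [[["a", "b"]], [["a"]], [["a"]], [["a"]]])

-- ===== CLAIM (what is proved, stated in full; the proofs are below) =====
def Claim_unchanged_tile_rotations : Prop := ∀ (tile : List (List String)), Dom_tile_rotations tile → Pre_tile_rotations tile → Spec_tile_rotations tile (tile_rotations tile)
def Claim_changed_tile_rotations : Prop := Dom_tile_rotations (pvDiffWitness_tile_rotations) ∧ Pre_tile_rotations (pvDiffWitness_tile_rotations) ∧ D_tile_rotations (pvDiffWitness_tile_rotations) ∧ tile_rotations (pvDiffWitness_tile_rotations) = pvDiffWitnessOut_tile_rotations.1 ∧ tile_rotations_alt (pvDiffWitness_tile_rotations) = pvDiffWitnessOut_tile_rotations.2 ∧ pvDiffWitnessOut_tile_rotations.1 ≠ pvDiffWitnessOut_tile_rotations.2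
def Claim_exact_tile_rotations : Prop := ∀ (tile : List (List String)), Dom_tile_rotations tile → Pre_tile_rotations tile → D_tile_rotations tile → tile_rotations tile ≠ tile_rotations_alt tile

-- ===== LEMMAS AND PROOFS =====

-- one 90° rotation, as B computes it
def rotF (t : List (List String)) (n : Nat) : List (List String) :=
  (List.range n).map (fun r => (List.range n).map (fun c => pvGet t (n - 1 - c) r))

def Square (t : List (List String)) (n : Nat) : Prop :=
  t.length = n ∧ ∀ row ∈ t, row.length = n

lemma foldl_set_length {α : Type} (f : Nat → α) :
    ∀ (k : Nat) (l : List α),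
      ((List.range k).foldl (fun r c => r.set c (f c)) l).length = l.length := by
  intro k
  induction k with
  | zero => intro l; simp
  | succ k ih => intro l; simp [List.range_succ, List.foldl_append, ih]

lemma foldl_set_getElem? {α : Type} (f : Nat → α) :
    ∀ (k : Nat) (l : List α) (i : Nat),
      ((List.range k).foldl (fun r c => r.set c (f c)) l)[i]? =
        if i < k ∧ i < l.length then some (f i) else l[i]? := by
  intro k
  induction k with
  | zero => intro l i; simp
  | succ k ih =>
    intro l i
    simp only [List.range_succ, List.foldl_append, List.foldl_cons, List.foldl_nil]
    rw [List.getElem?_set, foldl_set_length, ih]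
    by_cases hik : k = i
    · subst hik
      by_cases hlen : k < l.length
      · simp [hlen]
      · simp [hlen]
    · simp only [if_neg hik]
      by_cases h1 : i < k ∧ i < l.length
      · rw [if_pos h1, if_pos ⟨by omega, h1.2⟩]
      · rw [if_neg h1, if_neg (by omega)]

lemma foldl_set_eq_map {α : Type} (f : Nat → α) (n : Nat) (l : List α) (h : l.length = n) :
    (List.range n).foldl (fun r c => r.set c (f c)) l = (List.range n).map f := by
  apply List.ext_getElem?
  intro i
  rw [foldl_set_getElem? f n l i]
  by_cases hi : i < n
  · rw [if_pos ⟨hi, by omega⟩, List.getElem?_map, List.getElem?_range hi]; rfl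
  · rw [if_neg (by omega), List.getElem?_eq_none (by omega), List.getElem?_eq_none (by simp; omega)]


lemma getD_set_self {α : Type} (t : List α) (i : Nat) (x : α) (d : α) (h : i < t.length) :
    (t.set i x).getD i d = x := by
  rw [List.getD_eq_getElem?_getD, List.getElem?_set, if_pos rfl, if_pos h]
  rfl

lemma getD_map_range {α : Type} (f : Nat → α) (n i : Nat) (d : α) (h : i < n) :
    ((List.range n).map f).getD i d = f i := by
  rw [List.getD_eq_getElem?_getD, List.getElem?_map, List.getElem?_range h]
  rfl

lemma inner_eq (g : Nat → String) (row : Nat) :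
    ∀ (cs : List Nat) (t : List (List String)), row < t.length →
      cs.foldl (fun t c => t.set row ((t.getD row []).set c (g c))) t
        = t.set row (cs.foldl (fun r c => r.set c (g c)) (t.getD row [])) := by
  intro cs
  induction cs with
  | nil =>
    intro t ht
    simp only [List.foldl_nil]
    rw [List.getD_eq_getElem?_getD, List.getElem?_eq_getElem ht]
    exact (List.set_getElem_self ht).symm
  | cons c cs ih =>
    intro t ht
    simp only [List.foldl_cons]
    rw [ih _ (by simpa using ht)]
    rw [getD_set_self _ _ _ _ ht, List.set_set]

lemma outer_fold (previous : List (List String)) (n : Nat)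
    (t0 : List (List String)) (h0 : Square t0 n) :
    ∀ (k : Nat), k ≤ n →
      (List.range k).foldl (fun t row => pvInnerLoop previous n row t) t0
        = (List.range k).map
            (fun r => (List.range n).map (fun c => (previous.getD (n - c - 1) []).getD r ""))
          ++ t0.drop k := by
  intro k
  induction k with
  | zero => intro _; simp
  | succ k ih =>
    intro hk1
    obtain ⟨ht0len, ht0rows⟩ := h0
    have hk : k < n := by omega
    have hP := ih (by omega)
    simp only [List.range_succ, List.foldl_append, List.foldl_cons, List.foldl_nil, List.map_append]
    rw [hP]
    set newRow : Nat → List String :=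
      fun r => (List.range n).map (fun c => (previous.getD (n - c - 1) []).getD r "") with hnew
    set P := (List.range k).map newRow ++ t0.drop k with hPdef
    have hlenmap : ((List.range k).map newRow).length = k := by
      rw [List.length_map, List.length_range]
    have hPlen : P.length = n := by
      rw [hPdef, List.length_append, hlenmap, List.length_drop, ht0len]
      omega
    have hkt0 : k < t0.length := by omega
    have hrowk : P.getD k [] = t0[k]'hkt0 := by
      rw [List.getD_eq_getElem?_getD, hPdef,
        List.getElem?_append_right (by omega)]
      rw [hlenmap, Nat.sub_self, List.getElem?_drop, Nat.add_zero]
      rw [List.getElem?_eq_getElem hkt0]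
      rfl
    have hrowklen : (P.getD k []).length = n := by
      rw [hrowk]
      exact ht0rows _ (List.getElem_mem _)
    have hinner : pvInnerLoop previous n k P = P.set k (newRow k) := by
      unfold pvInnerLoop
      rw [inner_eq _ k _ _ (by omega)]
      rw [foldl_set_eq_map _ n _ hrowklen]
    have hdrop : t0.drop k = t0[k]'hkt0 :: t0.drop (k + 1) :=
      List.drop_eq_getElem_cons hkt0
    rw [hinner, hPdef, hdrop, List.set_append]
    rw [if_neg (by omega), hlenmap, Nat.sub_self]
    simp only [List.append_assoc, List.append_cancel_left_eq]
    rfl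

lemma rotStep_eq (previous : List (List String)) (n : Nat) (h : Square previous n) :
    pvRotStep previous n = rotF previous n := by
  unfold pvRotStep rotF
  have hid : previous.map (fun r => r) = previous := by simp
  rw [hid, outer_fold previous n previous h n (le_refl n)]
  have hdrop : previous.drop n = [] := by
    rw [← h.1]
    exact List.drop_length
  rw [hdrop, List.append_nil]
  apply List.map_congr_left
  intro r _
  apply List.map_congr_left
  intro c _
  have : n - c - 1 = n - 1 - c := by omega
  rw [this]
  rfl

lemma square_rotF (t : List (List String)) (n : Nat) : Square (rotF t n) n := by
  constructor
  · simp [rotF]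
  · intro row hrow
    rcases List.mem_map.1 hrow with ⟨r, _, hr⟩
    simp [← hr]

lemma pvGet_rotF (t : List (List String)) (n r c : Nat) (hr : r < n) (hc : c < n) :
    pvGet (rotF t n) r c = pvGet t (n - 1 - c) r := by
  unfold rotF pvGet
  rw [getD_map_range _ _ _ _ hr, getD_map_range _ _ _ _ hc]

lemma rotF_two (t : List (List String)) (n : Nat) :
    rotF (rotF t n) n
      = (List.range n).map (fun r => (List.range n).map (fun c => pvGet t (n - 1 - r) (n - 1 - c))) := by
  unfold rotF
  apply List.map_congr_left
  intro r hr
  apply List.map_congr_left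
  intro c hc
  rw [List.mem_range] at hr hc
  have h1 : n - 1 - c < n := by omega
  rw [show ((List.range n).map fun r => (List.range n).map fun c => pvGet t (n - 1 - c) r) = rotF t n from rfl]
  rw [pvGet_rotF t n (n - 1 - c) r h1 hr]

lemma rotF_three (t : List (List String)) (n : Nat) :
    rotF (rotF (rotF t n) n) n
      = (List.range n).map (fun r => (List.range n).map (fun c => pvGet t c (n - 1 - r))) := by
  rw [show rotF (rotF (rotF t n) n) n
      = (List.range n).map (fun r => (List.range n).map (fun c => pvGet (rotF (rotF t n) n) (n - 1 - c) r)) from rfl]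
  apply List.map_congr_left
  intro r hr
  apply List.map_congr_left
  intro c hc
  rw [List.mem_range] at hr hc
  have h1 : n - 1 - c < n := by omega
  have h2 : n - 1 - r < n := by omega
  rw [pvGet_rotF (rotF t n) n (n - 1 - c) r h1 hr]
  rw [pvGet_rotF t n (n - 1 - r) (n - 1 - c) h2 h1]
  congr 1
  omega

-- evaluate A's outer loop over range(0,3): the four accumulated orientations
lemma tile_rotations_eval (tile : List (List String)) :
    tile_rotations tile
      = [tile, pvRotStep tile tile.length,
         pvRotStep (pvRotStep tile tile.length) tile.length,
         pvRotStep (pvRotStep (pvRotStep tile tile.length) tile.length) tile.length] := rfl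

-- each pvInnerLoop step, hence pvRotStep, preserves every row's length
lemma step_map_length (row c : Nat) (v : String) (t : List (List String)) :
    (t.set row ((t.getD row []).set c v)).map List.length = t.map List.length := by
  by_cases h : row < t.length
  · rw [List.map_set, List.length_set]
    have : (t.getD row []).length = (t.map List.length)[row]'(by simpa using h) := by
      rw [List.getD_eq_getElem?_getD, List.getElem?_eq_getElem h]
      simp
    rw [this, List.set_getElem_self]
  · rw [List.set_eq_of_length_le (by omega)]

lemma innerLoop_map_length (previous : List (List String)) (size row : Nat)
    (t : List (List String)) :
    (pvInnerLoop previous size row t).map List.length = t.map List.length := by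
  unfold pvInnerLoop
  generalize List.range size = cs
  induction cs generalizing t with
  | nil => rfl
  | cons c cs ih =>
    rw [List.foldl_cons, ih, step_map_length]

lemma foldl_inner_map_length (previous : List (List String)) (size : Nat) :
    ∀ (cs : List Nat) (t : List (List String)),
      ((cs.foldl (fun t row => pvInnerLoop previous size row t) t).map List.length)
        = t.map List.length := by
  intro cs
  induction cs with
  | nil => intro t; rfl
  | cons c cs ih =>
    intro t
    rw [List.foldl_cons, ih, innerLoop_map_length]

lemma rotStep_map_length (previous : List (List String)) (size : Nat) :
    (pvRotStep previous size).map List.length = previous.map List.length := by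
  unfold pvRotStep
  rw [foldl_inner_map_length]
  simp

-- ===== VERDICT (by name: the statements are the Claim_ definitions above) =====
theorem tile_rotations_spec : Claim_unchanged_tile_rotations := by
  intro tile _ _
  unfold Spec_tile_rotations
  intro hnd
  have hpre : ∀ row ∈ tile, row.length = tile.length := by
    intro row hrow
    by_contra h
    exact hnd ⟨row, hrow, h⟩
  have hsq : Square tile tile.length := ⟨rfl, hpre⟩
  set n := tile.length with hn
  have h1 : pvRotStep tile n = rotF tile n := rotStep_eq _ _ hsq
  have h2 : pvRotStep (rotF tile n) n = rotF (rotF tile n) n :=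
    rotStep_eq _ _ (square_rotF tile n)
  have h3 : pvRotStep (rotF (rotF tile n) n) n = rotF (rotF (rotF tile n) n) n :=
    rotStep_eq _ _ (square_rotF (rotF tile n) n)
  rw [tile_rotations_eval]
  unfold tile_rotations_alt
  simp only [← hn, h1, h2, h3]
  rw [rotF_three, rotF_two]
  rfl

theorem tile_rotations_changed : Claim_changed_tile_rotations := by
  unfold Claim_changed_tile_rotations
  decide

theorem tile_rotations_tight : Claim_exact_tile_rotations := by
  intro tile _ _ hd heq
  obtain ⟨row, hrow, hne⟩ := hd
  obtain ⟨j, hj, hjeq⟩ := List.getElem_of_mem hrow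
  set n := tile.length with hn
  have hA1 : (tile_rotations tile)[1]? = some (pvRotStep tile n) := by
    rw [tile_rotations_eval]
    rfl
  have hB1 : (tile_rotations_alt tile)[1]? =
      some ((List.range n).map (fun r => (List.range n).map (fun c => pvGet tile (n - 1 - c) r))) := by
    rfl
  rw [heq, hB1] at hA1
  have hlen : (pvRotStep tile n).map List.length = tile.map List.length :=
    rotStep_map_length tile n
  rw [← (Option.some.injEq _ _).mp hA1] at hlen
  have hj' : ((List.map (fun r => List.map (fun c => pvGet tile (n - 1 - c) r) (List.range n)) (List.range n)).map List.length)[j]? = some n := by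
    rw [List.getElem?_map, List.getElem?_map, List.getElem?_range (by omega)]
    simp
  rw [hlen] at hj'
  rw [List.getElem?_map, List.getElem?_eq_getElem hj, hjeq] at hj'
  simp only [Option.map_some, Option.some.injEq] at hj'
  exact hne hj'
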